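-- pv_equiv track=rewrite | github.com/oigomezz/Retos | Hackerearth/Algorithms/Sorting/Counting-Sort/Finding-Pairs/solution.py | modified_counting_sort
-- ===== SOURCE A (Python) =====
-- def modified_counting_sort(arr):
--     count_arr = {}
--     for element in arr:
--         if element in count_arr:
--             count_arr[element] += 1
--         else:
--             count_arr[element] = 1
--
--     ans = 0
--     for index in count_arr:
--         count = count_arr[index]
--         ans += ((count)*(count+1))//2
--     return ans
-- ===== SOURCE B (Python) =====
-- def modified_counting_sort(arr):
--     ans = 0
--     run = 0
--     prev = None
--     for x in sorted(arr):
--         if x == prev: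
--             run += 1
--         else:
--             ans += run * (run + 1) // 2
--             run = 1
--             prev = x
--     return ans + run * (run + 1) // 2
-- ===== Notes on version B (the rewrite author's own statement) =====
-- stated objective: alternative
-- what changed: Replaces the hash-map frequency dictionary and second summation pass by sorting a copy of the list and a single run-length scan over adjacent equal elements.
import Mathlib
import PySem

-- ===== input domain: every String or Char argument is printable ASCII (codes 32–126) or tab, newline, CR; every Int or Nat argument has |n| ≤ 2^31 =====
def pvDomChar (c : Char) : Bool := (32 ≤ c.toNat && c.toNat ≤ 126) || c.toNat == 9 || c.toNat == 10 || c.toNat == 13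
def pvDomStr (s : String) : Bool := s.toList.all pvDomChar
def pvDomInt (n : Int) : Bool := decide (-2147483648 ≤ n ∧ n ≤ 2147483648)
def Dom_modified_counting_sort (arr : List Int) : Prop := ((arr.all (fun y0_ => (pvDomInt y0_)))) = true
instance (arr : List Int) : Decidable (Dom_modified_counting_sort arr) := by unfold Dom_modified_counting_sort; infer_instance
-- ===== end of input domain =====

-- B replaces A's hash-map frequency dictionary + second summation pass by sorting a copy and one run-length scan (alternative decomposition, not claimed faster).

-- ===== PORT A =====
-- 'count_arr[element] += 1' reads a key that is present, so getD _ 0 is exact;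
-- 'count_arr[index]' in the second loop likewise reads keys of the dict itself.
def modified_counting_sort (arr : List Int) : Int :=
  let count_arr := arr.foldl
    (fun d element =>
      if d.contains element then d.insert element (d.getD element 0 + 1)
      else d.insert element 1)
    PySem.Dict.empty
  count_arr.keys.foldl
    (fun ans index =>
      ans + PySem.Int.floordiv (count_arr.getD index 0 * (count_arr.getD index 0 + 1)) 2)
    0

-- ===== PORT B =====
-- state (ans, run, prev) over sorted(arr); prev : Option Int models Python's initial None
def modified_counting_sort_alt (arr : List Int) : Int :=
  let st := (PySem.List.sorted arr (fun x => x) false).foldl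
    (fun (st : Int × Int × Option Int) x =>
      if some x = st.2.2 then (st.1, st.2.1 + 1, st.2.2)
      else (st.1 + PySem.Int.floordiv (st.2.1 * (st.2.1 + 1)) 2, 1, some x))
    (0, 0, none)
  st.1 + PySem.Int.floordiv (st.2.1 * (st.2.1 + 1)) 2

-- ===== PRECONDITION & SPEC =====
def Spec_modified_counting_sort (arr : List Int) (out : Int) : Prop := out = modified_counting_sort_alt arr
instance (arr : List Int) (out : Int) : Decidable (Spec_modified_counting_sort arr out) := by unfold Spec_modified_counting_sort; infer_instance

-- ===== CLAIM (what is proved, stated in full; the proofs are below) =====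
def Claim_equal_modified_counting_sort : Prop := ∀ (arr : List Int), Dom_modified_counting_sort arr → Spec_modified_counting_sort arr (modified_counting_sort arr)

-- ===== LEMMAS AND PROOFS =====

-- tri(c) = c*(c+1)//2, the per-value contribution both programs add
def pvTri (c : Int) : Int := PySem.Int.floordiv (c * (c + 1)) 2

-- reference value: recurse on the first value's full multiplicity
def pvG : List Int → Int
  | [] => 0
  | x :: xs => pvTri (1 + (xs.count x : Int)) + pvG (xs.filter (fun y => y ≠ x))
termination_by l => l.length
decreasing_by
  simp only [List.length_cons, List.length_unattach]
  exact Nat.lt_succ_of_le (le_trans (List.length_filter_le _ _) (by simp))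

theorem pvSumSet_eq_pvG_aux : ∀ (n : Nat) (l : List Int), l.length ≤ n →
    ((PySem.Set.ofList l).map (fun v => pvTri ((l.count v : Int)))).sum = pvG l := by
  intro n
  induction n with
  | zero =>
    intro l hl
    have : l = [] := List.eq_nil_of_length_eq_zero (Nat.le_zero.mp hl)
    subst this
    simp [pvG]
  | succ n ih =>
    intro l hl
    match l with
    | [] => simp [pvG]
    | x :: xs =>
      have hx : x ∉ PySem.Set.ofList (xs.filter (fun y => y ≠ x)) := by
        intro h
        have := (PySem.Set.mem_ofList _ _).mp h
        simp at this
      have hperm : (PySem.Set.ofList (x :: xs)).Perm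
          (x :: PySem.Set.ofList (xs.filter (fun y => y ≠ x))) := by
        rw [List.perm_ext_iff_of_nodup (PySem.Set.nodup_ofList _) (List.nodup_cons.mpr ⟨hx, PySem.Set.nodup_ofList _⟩)]
        intro v
        simp only [PySem.Set.mem_ofList, List.mem_cons, List.mem_filter]
        by_cases hv : v = x <;> simp [hv]
      have ihf := ih (xs.filter (fun y => y ≠ x))
        (le_trans (List.length_filter_le _ _) (by simpa [Nat.lt_succ_iff] using hl))
      calc ((PySem.Set.ofList (x :: xs)).map (fun v => pvTri (((x :: xs).count v : Int)))).sum
          = ((x :: PySem.Set.ofList (xs.filter (fun y => y ≠ x))).map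
              (fun v => pvTri (((x :: xs).count v : Int)))).sum :=
            (hperm.map _).sum_eq
        _ = pvTri (((x :: xs).count x : Int))
              + ((PySem.Set.ofList (xs.filter (fun y => y ≠ x))).map
                  (fun v => pvTri (((x :: xs).count v : Int)))).sum := by
            simp
        _ = pvTri (1 + (xs.count x : Int))
              + ((PySem.Set.ofList (xs.filter (fun y => y ≠ x))).map
                  (fun v => pvTri (((xs.filter (fun y => y ≠ x)).count v : Int)))).sum := by
            congr 1
            · congr 1
              simp [List.count_cons_self]
              ring
            · refine congrArg _ (List.map_congr_left ?_)
              intro v hv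
              have hvx : v ≠ x := by
                have := (PySem.Set.mem_ofList _ _).mp hv
                simp at this
                exact this.2
              have h1 : (x :: xs).count v = xs.count v := by
                simp [List.count_cons]
                exact fun h => hvx h.symm
              have h2 : (xs.filter (fun y => y ≠ x)).count v = xs.count v := by
                rw [List.count_filter]
                simp [hvx]
              rw [h1, h2]
        _ = pvTri (1 + (xs.count x : Int)) + pvG (xs.filter (fun y => y ≠ x)) := by rw [ihf]
        _ = pvG (x :: xs) := by rw [pvG]

theorem pvSumSet_eq_pvG (l : List Int) :
    ((PySem.Set.ofList l).map (fun v => pvTri ((l.count v : Int)))).sum = pvG l :=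
  pvSumSet_eq_pvG_aux l.length l le_rfl

theorem pvG_perm {l l' : List Int} (h : l.Perm l') : pvG l = pvG l' := by
  rw [← pvSumSet_eq_pvG, ← pvSumSet_eq_pvG]
  have hsets : (PySem.Set.ofList l).Perm (PySem.Set.ofList l') := by
    rw [List.perm_ext_iff_of_nodup (PySem.Set.nodup_ofList _) (PySem.Set.nodup_ofList _)]
    intro v
    simp [PySem.Set.mem_ofList, h.mem_iff]
  have hcount : (fun v => pvTri ((l.count v : Int))) = (fun v => pvTri ((l'.count v : Int))) := by
    funext v
    rw [h.count_eq]
  rw [hcount]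
  exact (hsets.map _).sum_eq

theorem A_eq_pvG (arr : List Int) : modified_counting_sort arr = pvG arr := by
  have hfold : arr.foldl
      (fun d element =>
        if d.contains element then d.insert element (d.getD element 0 + 1)
        else d.insert element 1)
      PySem.Dict.empty = PySem.Dict.counter arr := by
    rw [← PySem.Dict.foldl_insert_getD_add_one_eq_counter arr]
    apply PySem.List.foldl_congr_mem
    intro d x _
    by_cases h : d.contains x = true
    · simp [h]
    · have h' : d.contains x = false := by simpa using h
      simp [PySem.Dict.getD_of_not_contains, h']
  simp only [modified_counting_sort, hfold]
  rw [PySem.List.foldl_add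
    (g := fun index => PySem.Int.floordiv
      ((PySem.Dict.counter arr).getD index 0 * ((PySem.Dict.counter arr).getD index 0 + 1)) 2)]
  simp only [PySem.Dict.getD_counter, PySem.Dict.keys_counter, zero_add]
  rw [← pvSumSet_eq_pvG]
  rfl

def pvStep (st : Int × Int × Option Int) (x : Int) : Int × Int × Option Int :=
  if some x = st.2.2 then (st.1, st.2.1 + 1, st.2.2)
  else (st.1 + PySem.Int.floordiv (st.2.1 * (st.2.1 + 1)) 2, 1, some x)

theorem B_loop (s : List Int) (hs : s.Pairwise (· ≤ ·)) :
    ∀ (ans run : Int) (prev : Option Int),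
      (∀ p, prev = some p → ∀ y ∈ s, p ≤ y) →
      ((s.foldl pvStep (ans, run, prev)).1
        + PySem.Int.floordiv
            ((s.foldl pvStep (ans, run, prev)).2.1
             * ((s.foldl pvStep (ans, run, prev)).2.1 + 1)) 2)
      = ans + pvTri (run + prev.elim 0 (fun p => (s.count p : Int)))
          + pvG (prev.elim s (fun p => s.filter (fun y => y ≠ p))) := by
  induction s with
  | nil =>
    intro ans run prev _
    cases prev <;> simp [pvTri, pvG, Option.elim]
  | cons x xs ih =>
    intro ans run prev hprev
    have hxs : xs.Pairwise (· ≤ ·) := hs.tail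
    have hxle : ∀ y ∈ xs, x ≤ y := fun y hy => (List.pairwise_cons.mp hs).1 y hy
    by_cases hcase : some x = prev
    · -- x equals prev: extend the run
      obtain rfl : prev = some x := hcase.symm
      have hstep : pvStep (ans, run, some x) x = (ans, run + 1, some x) := by
        simp [pvStep]
      rw [List.foldl_cons, hstep,
        ih hxs ans (run + 1) (some x)
          (fun q hq y hy => by
            injection hq with hq'
            exact hq' ▸ hprev x rfl y (List.mem_cons_of_mem _ hy))]
      simp only [Option.elim, List.count_cons_self, List.filter_cons]
      have hxx : ¬(x ≠ x) := by simp
      simp only [hxx, decide_false, decide_not]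
      congr 2
      push_cast
      ring
    · -- x differs from prev: flush the run, start a new one at x
      have hstep : pvStep (ans, run, prev) x
          = (ans + PySem.Int.floordiv (run * (run + 1)) 2, 1, some x) := by
        simp [pvStep, hcase]
      rw [List.foldl_cons, hstep,
        ih hxs _ 1 (some x)
          (fun q hq y hy => by injection hq with hq'; exact hq' ▸ hxle y hy)]
      cases prev with
      | none =>
        simp only [Option.elim]
        conv_rhs => rw [pvG]
        simp only [pvTri]
        ring
      | some p =>
        have hpx : p ≠ x := fun h => hcase (by rw [h])
        have hple : ∀ y ∈ x :: xs, p ≤ y := hprev p rfl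
        have hpnot : p ∉ x :: xs := by
          intro hmem
          rcases List.mem_cons.mp hmem with h | h
          · exact hpx h
          · exact hpx (le_antisymm (hple x (by simp)) (hxle p h))
        have hcnt : (x :: xs).count p = 0 := List.count_eq_zero.mpr hpnot
        have hfilt : (x :: xs).filter (fun y => y ≠ p) = x :: xs := by
          rw [List.filter_eq_self]
          intro y hy
          simp
          intro hyp
          exact hpnot (hyp ▸ hy)
        simp only [Option.elim]
        rw [hcnt, hfilt]
        conv_rhs => rw [pvG]
        simp only [pvTri]
        ring

theorem B_eq_pvG_sorted (arr : List Int) :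
    modified_counting_sort_alt arr = pvG (PySem.List.sorted arr (fun x => x) false) := by
  have hfun : (fun (st : Int × Int × Option Int) x =>
      if some x = st.2.2 then (st.1, st.2.1 + 1, st.2.2)
      else (st.1 + PySem.Int.floordiv (st.2.1 * (st.2.1 + 1)) 2, 1, some x)) = pvStep := rfl
  simp only [modified_counting_sort_alt, hfun]
  rw [B_loop (PySem.List.sorted arr (fun x => x) false)
      (by simpa using PySem.List.sorted_pairwise (xs := arr) (key := fun x => x))
      0 0 none (by intro p hp; cases hp)]
  simp [pvTri, PySem.Int.floordiv]

-- ===== VERDICT (by name: the statement is the Claim_ definition above) =====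
theorem modified_counting_sort_spec : Claim_equal_modified_counting_sort := by
  intro arr _
  show modified_counting_sort arr = modified_counting_sort_alt arr
  rw [A_eq_pvG, B_eq_pvG_sorted]
  exact pvG_perm (PySem.List.sorted_perm _ _ _).symm
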